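-- pv_equiv track=rewrite | github.com/itbc-bin/owe2a-afvinkopdracht1-ArielKomen | Startopgave_6.py | knipt
-- ===== SOURCE A (Python) =====
-- def knipt(sequentie, enzymenlijst):
--
--
--     sEnzymen = ""
--     for regel in enzymenlijst:
--         #kijkt of iets in de sequentie zit
--         if regel in sequentie:
--             sEnzymen += regel + " "
--
--     #en als er een hit is, wordt het enzym door gestuurd naar de main() functie
--     return sEnzymen
--     """
--     Bij deze functie kan je een deel van de code die je de afgelopen 2 afvinkopdrachten geschreven hebt herbruiken
--
--     Deze functie bepaald of een restrictie enzym in de sequentie (een element uit seqs) knipt.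
--     Hiervoor mag je kiezen wat je returnt, of wellicht wil je alleen maar printjes maken.
--     """
-- ===== SOURCE B (Python) =====
-- def knipt(sequentie, enzymenlijst):
--     # Index the sequence once: the set of all its substrings whose length occurs
--     # among the enzymes; each enzyme is then a single hash lookup.
--     n = len(sequentie)
--     lengths = {len(e) for e in enzymenlijst}
--     subs = {sequentie[i:i + L] for L in lengths for i in range(n - L + 1)}
--     hits = [e for e in enzymenlijst if e in subs]
--     return " ".join(hits) + " " if hits else ""
-- ===== Notes on version B (the rewrite author's own statement) =====
-- stated objective: faster
-- what changed: Instead of scanning the whole sequence once per enzyme with 'in', B builds one hash set of all substrings of the sequence at the distinct enzyme lengths and answers each enzyme by a single set lookup, joining the hits at the end.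
import Mathlib
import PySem

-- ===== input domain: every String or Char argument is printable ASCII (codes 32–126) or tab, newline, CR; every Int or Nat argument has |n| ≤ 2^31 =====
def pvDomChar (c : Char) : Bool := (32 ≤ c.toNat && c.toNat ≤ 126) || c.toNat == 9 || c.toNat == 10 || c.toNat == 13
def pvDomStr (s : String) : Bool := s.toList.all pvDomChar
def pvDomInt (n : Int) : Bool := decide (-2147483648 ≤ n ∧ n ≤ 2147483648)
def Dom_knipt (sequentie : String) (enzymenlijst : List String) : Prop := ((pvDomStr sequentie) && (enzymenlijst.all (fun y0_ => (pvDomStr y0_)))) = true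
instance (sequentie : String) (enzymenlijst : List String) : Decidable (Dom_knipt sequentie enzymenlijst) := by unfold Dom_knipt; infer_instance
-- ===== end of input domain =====

-- B indexes the sequence once in a substring set instead of scanning it per enzyme; alternative algorithm, same return value.

-- ===== PORT A =====
-- A accumulates a string via '+='; ported over List Char (Python str = its code points).
def knipt (sequentie : String) (enzymenlijst : List String) : String :=
  String.ofList (enzymenlijst.foldl
    (fun acc regel =>
      if PySem.Str.isIn regel sequentie then acc ++ (regel.toList ++ [' ']) else acc)
    [])

-- ===== PORT B =====
-- {sequentie[i:i+L] for L in lengths for i in range(n - L + 1)} : the slice s[i:i+L] for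
-- 0 ≤ i is exactly (s.drop i).take L (PySem.List.slice_natCast_add), and range(n-L+1)
-- with a possibly negative bound is List.range ((n - L + 1 : Int)).toNat.
def pvSubs (s : List Char) (lengths : List Nat) : List (List Char) :=
  lengths.flatMap (fun (L : Nat) =>
    (List.range ((s.length : Int) - (L : Int) + 1).toNat).map (fun i => (s.drop i).take L))

def knipt_alt (sequentie : String) (enzymenlijst : List String) : String :=
  let s := sequentie.toList
  let lengths : PySem.Set Nat := PySem.Set.ofList (enzymenlijst.map (fun e => e.toList.length))
  let subs : PySem.Set (List Char) := PySem.Set.ofList (pvSubs s lengths)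
  let hits := enzymenlijst.filter (fun e => PySem.Set.contains subs e.toList)
  if hits.isEmpty then ""
  else String.ofList (PySem.Chars.join [' '] (hits.map String.toList) ++ [' '])

-- ===== PRECONDITION & SPEC =====
def Spec_knipt (sequentie : String) (enzymenlijst : List String) (out : String) : Prop := out = knipt_alt sequentie enzymenlijst
instance (sequentie : String) (enzymenlijst : List String) (out : String) : Decidable (Spec_knipt sequentie enzymenlijst out) := by unfold Spec_knipt; infer_instance

-- ===== CLAIM (what is proved, stated in full; the proofs are below) =====
def Claim_equal_knipt : Prop := ∀ (sequentie : String) (enzymenlijst : List String), Dom_knipt sequentie enzymenlijst → Spec_knipt sequentie enzymenlijst (knipt sequentie enzymenlijst)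

-- ===== LEMMAS AND PROOFS =====

-- membership in the substring index is exactly infix, for words whose length is indexed
lemma mem_pvSubs_iff (s e : List Char) (lengths : List Nat) (hL : e.length ∈ lengths) :
    e ∈ pvSubs s lengths ↔ e <:+: s := by
  unfold pvSubs
  simp only [List.mem_flatMap, List.mem_map, List.mem_range]
  constructor
  · rintro ⟨L, -, i, -, rfl⟩
    exact ((List.take_prefix _ _).isInfix).trans (List.drop_suffix i s).isInfix
  · rintro ⟨p, t, rfl⟩
    refine ⟨e.length, hL, p.length, ?_, ?_⟩
    · have : (p ++ e ++ t).length = p.length + e.length + t.length := by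
        simp only [List.length_append]
      omega
    · rw [show p ++ e ++ t = p ++ (e ++ t) by simp, List.drop_left, List.take_left]

-- A's loop is 'filter then concatenate e + " "'
lemma foldA (l : List String) (P : String → Bool) (acc : List Char) :
    l.foldl (fun a e => if P e then a ++ (e.toList ++ [' ']) else a) acc
      = acc ++ (l.filter P).flatMap (fun e => e.toList ++ [' ']) := by
  induction l generalizing acc with
  | nil => simp
  | cons x xs ih =>
    by_cases h : P x <;> simp [h, ih]

-- " ".join(hits) + " " is the same concatenation, once hits is nonempty
lemma joinSpace (h : List Char) (t : List (List Char)) :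
    PySem.Chars.join [' '] (h :: t) ++ [' '] = (h :: t).flatMap (fun e => e ++ [' ']) := by
  induction t generalizing h with
  | nil => simp [PySem.Chars.join_singleton]
  | cons y ys ih =>
    rw [PySem.Chars.join_cons_cons]
    simp only [List.flatMap_cons] at ih ⊢
    rw [← ih y]
    simp

-- ===== VERDICT (by name: the statement is the Claim_ definition above) =====
theorem knipt_spec : Claim_equal_knipt := by
  intro sequentie enzymenlijst _
  unfold Spec_knipt knipt knipt_alt
  have hfilter :
      enzymenlijst.filter
          (fun e => PySem.Set.contains
            (PySem.Set.ofList (pvSubs sequentie.toList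
              (PySem.Set.ofList (enzymenlijst.map (fun e => e.toList.length))))) e.toList)
        = enzymenlijst.filter (fun e => PySem.Str.isIn e sequentie) := by
    apply List.filter_congr
    intro e he
    have hL : e.toList.length ∈
        (PySem.Set.ofList (enzymenlijst.map (fun e => e.toList.length)) : List Nat) := by
      rw [PySem.Set.mem_ofList]
      exact List.mem_map.mpr ⟨e, he, rfl⟩
    rw [Bool.eq_iff_iff, PySem.Set.contains_iff, PySem.Set.mem_ofList,
      mem_pvSubs_iff _ _ _ hL, PySem.Str.isIn_iff_infix]
  simp only [hfilter, foldA, List.nil_append]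
  rcases hh : enzymenlijst.filter (fun e => PySem.Str.isIn e sequentie) with _ | ⟨x, xs⟩
  · decide
  · rw [if_neg (by simp : ¬((x :: xs).isEmpty = true))]
    congr 1
    rw [List.map_cons, joinSpace]
    simp [List.flatMap_map]
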